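-- pv_equiv track=rewrite | github.com/viscid-hub/Viscid | viscid/parallel.py | chunk_slices
-- ===== SOURCE A (Python) =====
-- from math import ceil
--
-- def chunk_slices(nel, nchunks, size=None):
--     r"""Make continuous chunks
--
--     Get the slice info (can be unpacked and passed to the slice builtin
--     as in slice(\*ret[i])) for nchunks contiguous chunks in a list with
--     nel elements
--
--     Parameters:
--         nel: how many elements are in one pass of the original list
--         nchunks: how many chunks to make
--         size: if given, set nchunks such that chunks have about 'size'
--             elements
--
--     Returns:
--         a list of (start, stop) tuples with length nchunks
--
--     Example:
--         >>> sl1, sl2 = chunk_slices(5, 2)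
--         >>> sl1 == (0, 3)  # 3 vals
--         True
--         >>> sl2 == (3, 5)  # 2 vals
--         True
--     """
--     if size is not None:
--         nchunks = int(ceil(nel / nchunks))
--
--     nlong = nel % nchunks  # nshort guarenteed < nchunks
--     lenshort = nel // nchunks
--     lenlong = lenshort + 1
--
--     ret = [None] * nchunks
--     start = 0
--     for i in range(nlong):
--         ret[i] = (start, start + lenlong)
--         start += lenlong
--     for i in range(nlong, nchunks):
--         ret[i] = (start, start + lenshort)
--         start += lenshort
--     return ret
-- ===== SOURCE B (Python) =====
-- from math import ceil
--
-- def chunk_slices(nel, nchunks, size=None):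
--     """Closed-form re-implementation: each boundary computed independently
--     as b_i = i*lenshort + min(i, nlong), no running accumulator."""
--     if size is not None:
--         nchunks = int(ceil(nel / nchunks))
--     nlong = nel % nchunks
--     lenshort = nel // nchunks
--     return [(i * lenshort + min(i, nlong),
--              (i + 1) * lenshort + min(i + 1, nlong))
--             for i in range(nchunks)]
-- ===== Notes on version B (the rewrite author's own statement) =====
-- stated objective: simpler
-- what changed: Replaced A's two sequential loops with a running start accumulator and a preallocated ret list by a single comprehension computing each (start, stop) pair in closed form as i*lenshort + min(i, nlong).
import Mathlib
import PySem

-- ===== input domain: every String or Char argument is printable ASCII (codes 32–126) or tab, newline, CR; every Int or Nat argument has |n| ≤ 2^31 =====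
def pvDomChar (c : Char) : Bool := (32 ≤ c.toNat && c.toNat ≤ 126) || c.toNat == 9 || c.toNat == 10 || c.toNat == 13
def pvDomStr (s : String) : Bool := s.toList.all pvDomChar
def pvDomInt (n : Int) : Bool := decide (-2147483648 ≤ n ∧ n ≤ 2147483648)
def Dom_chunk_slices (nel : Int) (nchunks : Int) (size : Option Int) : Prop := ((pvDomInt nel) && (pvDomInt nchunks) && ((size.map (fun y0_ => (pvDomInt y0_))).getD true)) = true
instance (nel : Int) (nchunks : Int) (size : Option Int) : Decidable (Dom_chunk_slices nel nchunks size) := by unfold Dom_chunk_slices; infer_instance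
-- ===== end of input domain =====

-- B replaces A's two sequential accumulator loops by one comprehension with a
-- closed-form boundary i*lenshort + min(i, nlong); objective: simpler.

-- ===== PORT A =====
-- int(ceil(nel / nchunks)) is ported as -((-nel) // nchunks); exact on the stated
-- |n| ≤ 2^31 domain, where float division cannot cross an integer.
-- ret = [None]*nchunks filled by index-order assignments is ported as appending folds
-- over the same ranges with the same (ret, start) state.
def chunk_slices (nel : Int) (nchunks : Int) (size : Option Int) : List (Int × Int) :=
  let m : Int := match size with
    | none => nchunks
    | some _ => -(PySem.Int.floordiv (-nel) nchunks)
  let nlong := PySem.Int.mod nel m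
  let lenshort := PySem.Int.floordiv nel m
  let lenlong := lenshort + 1
  let p1 := (PySem.List.pyRange 0 nlong 1).foldl
      (fun (p : List (Int × Int) × Int) _ => (p.1 ++ [(p.2, p.2 + lenlong)], p.2 + lenlong))
      ([], 0)
  let p2 := (PySem.List.pyRange nlong m 1).foldl
      (fun (p : List (Int × Int) × Int) _ => (p.1 ++ [(p.2, p.2 + lenshort)], p.2 + lenshort))
      p1
  p2.1

-- ===== PORT B =====
def chunk_slices_alt (nel : Int) (nchunks : Int) (size : Option Int) : List (Int × Int) :=
  let m : Int := match size with
    | none => nchunks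
    | some _ => -(PySem.Int.floordiv (-nel) nchunks)
  let nlong := PySem.Int.mod nel m
  let lenshort := PySem.Int.floordiv nel m
  (PySem.List.pyRange 0 m 1).map
    (fun i => (i * lenshort + min i nlong, (i + 1) * lenshort + min (i + 1) nlong))

-- ===== PRECONDITION & SPEC =====
-- Pre_ excludes exactly the inputs where Python A raises ZeroDivisionError:
-- nchunks == 0, or (size given and the recomputed chunk count ceil(nel/nchunks) == 0).
def Pre_chunk_slices (nel : Int) (nchunks : Int) (size : Option Int) : Prop :=
  nchunks ≠ 0 ∧ (size = none ∨ -(PySem.Int.floordiv (-nel) nchunks) ≠ 0)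
instance (nel : Int) (nchunks : Int) (size : Option Int) : Decidable (Pre_chunk_slices nel nchunks size) := by unfold Pre_chunk_slices; infer_instance

def pvWitness_chunk_slices : Int × Int × Option Int := (5, 2, none)

def Spec_chunk_slices (nel : Int) (nchunks : Int) (size : Option Int) (out : List (Int × Int)) : Prop := out = chunk_slices_alt nel nchunks size
instance (nel : Int) (nchunks : Int) (size : Option Int) (out : List (Int × Int)) : Decidable (Spec_chunk_slices nel nchunks size out) := by unfold Spec_chunk_slices; infer_instance

-- ===== CLAIM (what is proved, stated in full; the proofs are below) =====
def Claim_equal_chunk_slices : Prop := ∀ (nel : Int) (nchunks : Int) (size : Option Int), Dom_chunk_slices nel nchunks size → Pre_chunk_slices nel nchunks size → Spec_chunk_slices nel nchunks size (chunk_slices nel nchunks size)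

-- ===== LEMMAS AND PROOFS =====

-- A's appending fold over any list, in closed form (the element is ignored).
theorem pv_fold_const (l : List Int) (L : Int) (acc : List (Int × Int)) (s : Int) :
    l.foldl (fun (p : List (Int × Int) × Int) _ => (p.1 ++ [(p.2, p.2 + L)], p.2 + L)) (acc, s)
      = (acc ++ (List.range l.length).map
            (fun j : Nat => (s + (j : Int) * L, s + ((j : Int) + 1) * L)),
         s + (l.length : Int) * L) := by
  induction l generalizing acc s with
  | nil => simp
  | cons x t ih =>
    simp only [List.foldl_cons, ih, List.length_cons, List.range_succ_eq_map,
      List.map_cons, List.map_map]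
    refine Prod.ext ?_ ?_
    · simp only [List.append_assoc, List.cons_append, List.nil_append]
      congr 2
      · push_cast; ring_nf
      apply List.map_congr_left
      intro j _
      simp only [Function.comp]
      refine Prod.ext ?_ ?_ <;> · simp; ring
    · simp; ring

theorem pv_main (nel m : Int) (hm : m ≠ 0) :
    ((PySem.List.pyRange (PySem.Int.mod nel m) m 1).foldl
        (fun (p : List (Int × Int) × Int) _ =>
          (p.1 ++ [(p.2, p.2 + PySem.Int.floordiv nel m)], p.2 + PySem.Int.floordiv nel m))
        ((PySem.List.pyRange 0 (PySem.Int.mod nel m) 1).foldl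
          (fun (p : List (Int × Int) × Int) _ =>
            (p.1 ++ [(p.2, p.2 + (PySem.Int.floordiv nel m + 1))], p.2 + (PySem.Int.floordiv nel m + 1)))
          ([], 0))).1
      = (PySem.List.pyRange 0 m 1).map
          (fun i => (i * PySem.Int.floordiv nel m + min i (PySem.Int.mod nel m),
                     (i + 1) * PySem.Int.floordiv nel m + min (i + 1) (PySem.Int.mod nel m))) := by
  set nlong := PySem.Int.mod nel m with hnl
  set lenshort := PySem.Int.floordiv nel m with hls
  rcases lt_or_gt_of_ne hm with hneg | hpos
  · -- m < 0 : all three ranges are empty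
    have hb := PySem.Int.mod_neg_bounds nel hneg
    rw [PySem.List.pyRange_one_eq_nil (a := 0) (by omega),
        PySem.List.pyRange_one_eq_nil (a := nlong) (by omega),
        PySem.List.pyRange_one_eq_nil (a := 0) (by omega)]
    simp
  · -- m > 0
    have h0 : 0 ≤ nlong := PySem.Int.mod_nonneg nel hpos
    have h1 : nlong < m := PySem.Int.mod_lt nel hpos
    rw [pv_fold_const, pv_fold_const]
    simp only [List.nil_append, Int.sub_zero,
      PySem.List.pyRange_one, List.length_map, List.length_range]
    have hsplit : m.toNat = nlong.toNat + (m - nlong).toNat := by omega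
    rw [hsplit, List.range_add, List.map_append, List.map_append, List.map_map, List.map_map]
    congr 1
    · apply List.map_congr_left
      intro j hj
      rw [List.mem_range] at hj
      have hj' : (j : Int) < nlong := by omega
      have e1 : min ((0 : Int) + (j : Int)) nlong = (j : Int) := by omega
      have e2 : min ((0 : Int) + (j : Int) + 1) nlong = (j : Int) + 1 := by omega
      simp only [Function.comp, e1, e2]
      refine Prod.ext ?_ ?_ <;> · simp; ring
    · rw [List.map_map]
      apply List.map_congr_left
      intro j hj
      rw [List.mem_range] at hj
      simp only [Function.comp]
      have hc : ((nlong.toNat : Int)) = nlong := by omega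
      refine Prod.ext ?_ ?_ <;>
        · push_cast
          rw [min_eq_right (by omega), hc]
          ring
theorem chunk_slices_spec : Claim_equal_chunk_slices := by
  intro nel nchunks size hdom hpre
  unfold Spec_chunk_slices
  obtain ⟨hnz, hpre2⟩ := hpre
  cases size with
  | none =>
    simp only [chunk_slices, chunk_slices_alt]
    exact pv_main nel nchunks hnz
  | some v =>
    have hm : -(PySem.Int.floordiv (-nel) nchunks) ≠ 0 := by
      rcases hpre2 with h | h
      · exact absurd h (by simp)
      · exact h
    simp only [chunk_slices, chunk_slices_alt]
    exact pv_main nel _ hm
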